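-- pv_equiv track=rewrite | github.com/realkss/hypomnemata | scripts/sync-training-sessions.py | serialize_moves
-- ===== SOURCE A (Python) =====
-- def serialize_moves(moves: list[str]) -> str:
--     parts: list[str] = []
--     for index, san in enumerate(moves):
--         move_number = index // 2 + 1
--         if index % 2 == 0:
--             parts.append(f"{move_number}. {san}")
--         else:
--             parts.append(san)
--     return " ".join(parts)
-- ===== SOURCE B (Python) =====
-- def serialize_moves(moves: list[str]) -> str:
--     chunks: list[str] = []
--     n = 0
--     it = iter(moves)
--     for white in it:
--         n += 1
--         black = next(it, None)
--         if black is None: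
--             chunks.append(f"{n}. {white}")
--         else:
--             chunks.append(f"{n}. {white} {black}")
--     return " ".join(chunks)
-- ===== Notes on version B (the rewrite author's own statement) =====
-- stated objective: alternative
-- what changed: B recurses over move-number pairs (one chunk per full move, the dangling white move as its own chunk) instead of A's per-ply enumerate loop with an even/odd index test.
import Mathlib
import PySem

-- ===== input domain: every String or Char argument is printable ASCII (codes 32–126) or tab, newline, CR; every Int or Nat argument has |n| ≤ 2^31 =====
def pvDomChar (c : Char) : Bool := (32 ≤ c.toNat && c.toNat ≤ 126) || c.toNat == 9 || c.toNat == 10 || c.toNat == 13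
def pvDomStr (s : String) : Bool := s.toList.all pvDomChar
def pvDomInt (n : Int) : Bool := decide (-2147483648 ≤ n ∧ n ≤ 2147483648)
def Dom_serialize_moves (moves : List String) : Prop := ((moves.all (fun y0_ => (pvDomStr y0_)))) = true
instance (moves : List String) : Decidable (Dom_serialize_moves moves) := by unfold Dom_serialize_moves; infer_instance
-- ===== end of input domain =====

-- B replaces A's per-ply enumerate loop (even/odd index test) by a recursion over
-- move-number pairs, one chunk per full move; objective: alternative decomposition.

-- ===== PORT A =====
def serialize_moves (moves : List String) : String :=
  let parts : List String :=
    (PySem.List.enumerate moves).foldl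
      (fun parts p =>
        let index := p.1
        let san := p.2
        let move_number := PySem.Int.floordiv index 2 + 1
        if PySem.Int.mod index 2 == 0 then
          parts ++ [PySem.Int.toStr move_number ++ ". " ++ san]
        else
          parts ++ [san]) []
  PySem.Str.join " " parts

-- ===== PORT B =====
def smChunks (n : Int) (ms : List String) : List String :=
  match ms with
  | [] => []
  | [w] => [PySem.Int.toStr n ++ ". " ++ w]
  | w :: b :: rest => (PySem.Int.toStr n ++ ". " ++ w ++ " " ++ b) :: smChunks (n + 1) rest

def serialize_moves_alt (moves : List String) : String :=
  PySem.Str.join " " (smChunks 1 moves)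

-- ===== PRECONDITION & SPEC =====
def Spec_serialize_moves (moves : List String) (out : String) : Prop := out = serialize_moves_alt moves
instance (moves : List String) (out : String) : Decidable (Spec_serialize_moves moves out) := by unfold Spec_serialize_moves; infer_instance

-- ===== CLAIM (what is proved, stated in full; the proofs are below) =====
def Claim_equal_serialize_moves : Prop := ∀ (moves : List String), Dom_serialize_moves moves → Spec_serialize_moves moves (serialize_moves moves)

-- ===== LEMMAS AND PROOFS =====

/-- The per-ply part A appends at enumerate index `p.1` for move `p.2`. -/
def smPart (p : Int × String) : String :=
  if PySem.Int.mod p.1 2 == 0 then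
    PySem.Int.toStr (PySem.Int.floordiv p.1 2 + 1) ++ ". " ++ p.2
  else p.2

theorem smFoldl_eq_map (l : List (Int × String)) (acc : List String) :
    l.foldl
      (fun parts p =>
        let index := p.1
        let san := p.2
        let move_number := PySem.Int.floordiv index 2 + 1
        if PySem.Int.mod index 2 == 0 then
          parts ++ [PySem.Int.toStr move_number ++ ". " ++ san]
        else
          parts ++ [san]) acc = acc ++ l.map smPart := by
  induction l generalizing acc with
  | nil => simp
  | cons p rest ih =>
    simp only [List.foldl_cons, List.map_cons, ih, smPart]
    split <;> simp

theorem smMod_even (n : Int) : PySem.Int.mod (2 * n) 2 = 0 := by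
  simp [PySem.Int.mod, Int.fmod_eq_emod, Int.mul_emod_right]

theorem smMod_odd (n : Int) : PySem.Int.mod (2 * n + 1) 2 = 1 := by
  simp [PySem.Int.mod, Int.fmod_eq_emod]

theorem smDiv_even (n : Int) : PySem.Int.floordiv (2 * n) 2 = n := by
  simp [PySem.Int.floordiv, Int.fdiv_eq_ediv]

/-- `join` respects replacing the tail by one with the same join and the same emptiness. -/
theorem smJoin_cons_congr (sep x : List Char) (A B : List (List Char))
    (h : PySem.Chars.join sep A = PySem.Chars.join sep B) (he : A = [] ↔ B = []) :
    PySem.Chars.join sep (x :: A) = PySem.Chars.join sep (x :: B) := by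
  cases A with
  | nil =>
    cases B with
    | nil => rfl
    | cons b B' => simp at he
  | cons a A' =>
    cases B with
    | nil => simp at he
    | cons b B' => simp only [PySem.Chars.join_cons_cons, h]

/-- Merging a pair `a ++ sep ++ b` into one chunk is invisible to `join sep`. -/
theorem smJoin_merge (sep a b : List Char) (L : List (List Char)) :
    PySem.Chars.join sep ((a ++ sep ++ b) :: L) = PySem.Chars.join sep (a :: b :: L) := by
  cases L with
  | nil => simp [PySem.Chars.join_cons_cons, PySem.Chars.join_singleton]
  | cons c L' =>
    simp [PySem.Chars.join_cons_cons, List.append_assoc]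

theorem smMain : ∀ (ms : List String) (n : Int),
    PySem.Chars.join [' ']
        (((PySem.List.enumerate ms (2 * n)).map smPart).map String.toList)
      = PySem.Chars.join [' '] ((smChunks (n + 1) ms).map String.toList)
  | [], n => by simp [smChunks]
  | [w], n => by
    simp [PySem.List.enumerate_cons, PySem.List.enumerate_nil, smChunks, smPart]
  | w :: b :: rest, n => by
    have ih := smMain rest (n + 1)
    have h2 : 2 * n + 1 + 1 = 2 * (n + 1) := by ring
    simp only [PySem.List.enumerate_cons, List.map_cons, smPart, smMod_even, smMod_odd,
      smDiv_even, h2, smChunks]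
    norm_num
    rw [show (PySem.Int.toChars (n + 1) ++ (". ".toList ++ (w.toList ++ (" ".toList ++ b.toList))))
        = (PySem.Int.toChars (n + 1) ++ (". ".toList ++ w.toList)) ++ [' '] ++ b.toList by
      simp [List.append_assoc]]
    rw [smJoin_merge]
    apply smJoin_cons_congr
    · apply smJoin_cons_congr
      · simpa [List.map_map] using ih
      · cases rest with
        | nil => simp [PySem.List.enumerate_nil, smChunks]
        | cons r rs =>
          cases rs <;> simp [PySem.List.enumerate_cons, smChunks]
    · simp

-- ===== VERDICT (by name: the statement is the Claim_ definition above) =====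
theorem serialize_moves_spec : Claim_equal_serialize_moves := by
  intro moves _
  unfold Spec_serialize_moves serialize_moves serialize_moves_alt
  simp only [smFoldl_eq_map, List.nil_append]
  apply String.ext
  rw [PySem.Str.toList_join, PySem.Str.toList_join]
  have h := smMain moves 0
  simpa using h
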